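-- pv_equiv track=rewrite | github.com/UTD-FAST-Lab/Featured-Bench-Artifacts | code/generator/generate_prog_hard.py | generate_template
-- ===== SOURCE A (Python) =====
-- def generate_template(length, conditions):
--     template = """    if (size < {LENGTH}) {{
--         printf("File is too small...");
--         return;
--     }}\n""".format(LENGTH=length)
--
--     for i, condition in enumerate(conditions):
--         indent = "    " * (i + 1)
--         MAGIC = condition.get('value')
--         template += f"""{indent}if ({MAGIC}) {{\n"""
--
--     template += "{indent}printf(\"Found magic symbol!\");\n{indent}int *ptr = NULL;\n{indent}*ptr = 10;\n".format(indent="    " * (len(conditions) + 1))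
--     for i in range(len(conditions)-1):
--         indent = "    " * (len(conditions)-i)
--         template += f"""{indent}}}\n"""
--     template += """    } else {
--         printf("Not magic symbol, continue...");
--     }\n"""
--
--     return template
-- ===== SOURCE B (Python) =====
-- def generate_template(length, conditions):
--     # simpler: one recursive helper builds the nested ifs, payload and closings in one pass
--     def nest(i):
--         if i == len(conditions):
--             ind = "    " * (len(conditions) + 1)
--             return (f'{ind}printf("Found magic symbol!");\n'
--                     f'{ind}int *ptr = NULL;\n'
--                     f'{ind}*ptr = 10;\n')
--         ind = "    " * (i + 1)
--         body = f"{ind}if ({conditions[i].get('value')}) {{\n" + nest(i + 1)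
--         if i > 0:
--             body += ind + "}\n"
--         return body
--     header = (f'    if (size < {length}) {{\n'
--               '        printf("File is too small...");\n'
--               '        return;\n'
--               '    }\n')
--     tail = ('    } else {\n'
--             '        printf("Not magic symbol, continue...");\n'
--             '    }\n')
--     return header + nest(0) + tail
-- ===== Notes on version B (the rewrite author's own statement) =====
-- stated objective: simpler
-- what changed: A's two index loops (one appending 'if (...) {' openers, a second appending the closing braces in reverse) are replaced by a single recursive helper that emits each level's opener, the nested rest, and that level's closing brace in one pass, with the header and the '} else' tail kept as constants.
import Mathlib
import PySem

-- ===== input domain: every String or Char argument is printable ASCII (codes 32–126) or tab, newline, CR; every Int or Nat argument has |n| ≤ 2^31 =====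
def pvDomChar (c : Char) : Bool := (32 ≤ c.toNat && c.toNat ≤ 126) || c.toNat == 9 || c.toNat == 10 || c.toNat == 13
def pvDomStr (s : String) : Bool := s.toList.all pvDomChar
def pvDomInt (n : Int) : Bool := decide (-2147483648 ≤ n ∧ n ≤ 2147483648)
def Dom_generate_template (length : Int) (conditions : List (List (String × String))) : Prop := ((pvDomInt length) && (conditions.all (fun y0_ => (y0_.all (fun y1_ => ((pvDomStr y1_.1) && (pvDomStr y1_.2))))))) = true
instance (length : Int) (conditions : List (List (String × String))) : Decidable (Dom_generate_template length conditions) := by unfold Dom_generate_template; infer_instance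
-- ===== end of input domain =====

-- B replaces A's two index loops (open braces, then close braces) by one recursive
-- helper that nests the ifs, payload and closing braces in a single pass (objective: simpler).

-- f"{x}" for x = condition.get('value') : Option String — Python prints None as "None" (exact).
def pvFmtVal (o : Option String) : List Char :=
  match o with
  | none => "None".toList
  | some s => s.toList

-- ===== PORT A =====
def generate_template (length : Int) (conditions : List (List (String × String))) : String :=
  let template := "    if (size < ".toList ++ PySem.Int.toChars length ++
    ") {\n        printf(\"File is too small...\");\n        return;\n    }\n".toList
  let template := (PySem.List.enumerate conditions).foldl
    (fun t p =>
      let indent := PySem.List.pyRepeat "    ".toList (p.1 + 1)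
      let magic := PySem.Dict.get? (PySem.Dict.mk p.2) "value"
      t ++ indent ++ "if (".toList ++ pvFmtVal magic ++ ") {\n".toList) template
  let indent := PySem.List.pyRepeat "    ".toList ((conditions.length : Int) + 1)
  let template := template ++ indent ++ "printf(\"Found magic symbol!\");\n".toList ++
    indent ++ "int *ptr = NULL;\n".toList ++ indent ++ "*ptr = 10;\n".toList
  let template := (PySem.List.pyRange 0 ((conditions.length : Int) - 1) 1).foldl
    (fun t i =>
      t ++ PySem.List.pyRepeat "    ".toList ((conditions.length : Int) - i) ++ "}\n".toList) template
  String.ofList (template ++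
    "    } else {\n        printf(\"Not magic symbol, continue...\");\n    }\n".toList)

-- ===== PORT B =====
def pvIndentB (n : Nat) : List Char := (List.replicate n "    ".toList).flatten

def pvPayload (n : Nat) : List Char :=
  let ind := pvIndentB (n + 1)
  ind ++ "printf(\"Found magic symbol!\");\n".toList ++
  ind ++ "int *ptr = NULL;\n".toList ++ ind ++ "*ptr = 10;\n".toList

-- nest(i) from Source B: recursion over the remaining conditions, i the current depth.
def pvNest (n : Nat) (i : Nat) : List (List (String × String)) → List Char
  | [] => pvPayload n
  | c :: rest =>
    let ind := pvIndentB (i + 1)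
    let body := ind ++ "if (".toList ++ pvFmtVal (PySem.Dict.get? (PySem.Dict.mk c) "value") ++
      ") {\n".toList ++ pvNest n (i + 1) rest
    if 0 < i then body ++ ind ++ "}\n".toList else body

def generate_template_alt (length : Int) (conditions : List (List (String × String))) : String :=
  let header := "    if (size < ".toList ++ PySem.Int.toChars length ++
    ") {\n        printf(\"File is too small...\");\n        return;\n    }\n".toList
  let tail := "    } else {\n        printf(\"Not magic symbol, continue...\");\n    }\n".toList
  String.ofList (header ++ pvNest conditions.length 0 conditions ++ tail)

-- ===== PRECONDITION & SPEC =====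
def Spec_generate_template (length : Int) (conditions : List (List (String × String))) (out : String) : Prop := out = generate_template_alt length conditions
instance (length : Int) (conditions : List (List (String × String))) (out : String) : Decidable (Spec_generate_template length conditions out) := by unfold Spec_generate_template; infer_instance

-- ===== CLAIM (what is proved, stated in full; the proofs are below) =====
def Claim_equal_generate_template : Prop := ∀ (length : Int) (conditions : List (List (String × String))), Dom_generate_template length conditions → Spec_generate_template length conditions (generate_template length conditions)

-- ===== LEMMAS AND PROOFS =====

-- one "if (...) {" opener at depth i
def pvOpn (i : Nat) (c : List (String × String)) : List Char :=
  pvIndentB (i + 1) ++ "if (".toList ++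
    pvFmtVal (PySem.Dict.get? (PySem.Dict.mk c) "value") ++ ") {\n".toList

def pvOpens (i : Nat) : List (List (String × String)) → List Char
  | [] => []
  | c :: rest => pvOpn i c ++ pvOpens (i + 1) rest

-- closings emitted when unwinding from depth i+k-1 down to depth i
def pvCloses (i : Nat) : Nat → List Char
  | 0 => []
  | k + 1 => pvCloses (i + 1) k ++ pvIndentB (i + 1) ++ "}\n".toList

theorem pvRepeat_natCast (xs : List Char) (k : Nat) :
    PySem.List.pyRepeat xs (k : Int) = (List.replicate k xs).flatten := by
  simp [PySem.List.pyRepeat]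

-- A's opening loop
theorem pvFoldOpen (cs : List (List (String × String))) (i : Nat) (t : List Char) :
    (PySem.List.enumerate cs (i : Int)).foldl
      (fun t p =>
        t ++ PySem.List.pyRepeat "    ".toList (p.1 + 1) ++ "if (".toList ++
          pvFmtVal (PySem.Dict.get? (PySem.Dict.mk p.2) "value") ++ ") {\n".toList) t
    = t ++ pvOpens i cs := by
  induction cs generalizing i t with
  | nil => simp [PySem.List.enumerate, pvOpens]
  | cons c rest ih =>
    rw [PySem.List.enumerate_cons]
    simp only [List.foldl_cons]
    have hc : ((i : Int) + 1) = ((i + 1 : Nat) : Int) := by push_cast; ring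
    rw [hc, ih (i + 1)]
    rw [pvRepeat_natCast]
    simp [pvOpens, pvOpn, pvIndentB, List.append_assoc]

-- pvCloses as the flatMap A's closing loop produces
theorem pvCloses_eq (k i : Nat) :
    pvCloses i k = (List.range k).flatMap (fun j => pvIndentB (i + k - j) ++ "}\n".toList) := by
  induction k generalizing i with
  | zero => simp [pvCloses]
  | succ k ih =>
    rw [pvCloses, ih (i + 1), List.range_succ]
    simp only [List.flatMap_append, List.flatMap_cons, List.flatMap_nil, List.append_nil]
    have h1 : ∀ j : Nat, i + 1 + k - j = i + (k + 1) - j := by omega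
    have h2 : i + (k + 1) - k = i + 1 := by omega
    simp only [h1, h2, List.append_assoc]

-- A's closing loop
theorem pvFoldClose (n : Nat) (t : List Char) :
    (PySem.List.pyRange 0 ((n : Int) - 1) 1).foldl
      (fun t i =>
        t ++ PySem.List.pyRepeat "    ".toList ((n : Int) - i) ++ "}\n".toList) t
    = t ++ (if n = 0 then [] else pvCloses 1 (n - 1)) := by
  rcases Nat.eq_zero_or_pos n with h0 | hpos
  · subst h0
    rw [PySem.List.pyRange_one_eq_nil (by omega)]
    simp
  · rw [if_neg (by omega)]
    rw [PySem.List.pyRange_one]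
    rw [List.foldl_map]
    have hstep : (fun (t : List Char) (k : Nat) =>
        t ++ PySem.List.pyRepeat "    ".toList ((n : Int) - ((0 : Int) + (k : Int))) ++ "}\n".toList)
        = fun (t : List Char) (k : Nat) => t ++ (PySem.List.pyRepeat "    ".toList ((n : Int) - ((0 : Int) + (k : Int))) ++ "}\n".toList) := by
      funext t k; rw [List.append_assoc]
    rw [hstep, PySem.List.foldl_append_eq_flatMap]
    rw [pvCloses_eq]
    congr 1
    have hn : ((n : Int) - 1 - 0).toNat = n - 1 := by omega
    rw [hn]
    rw [List.flatMap_def, List.flatMap_def]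
    congr 1
    apply List.map_congr_left
    intro j hj
    have hjn : j < n - 1 := List.mem_range.mp hj
    have h1 : ((n : Int) - ((0 : Int) + (j : Int))) = ((n - j : Nat) : Int) := by omega
    have h2 : 1 + (n - 1) - j = n - j := by omega
    rw [h1, pvRepeat_natCast, h2]
    rfl

-- B's recursion, at positive depth
theorem pvNest_pos (n : Nat) (rest : List (List (String × String))) (i : Nat) (hi : 0 < i) :
    pvNest n i rest = pvOpens i rest ++ pvPayload n ++ pvCloses i rest.length := by
  induction rest generalizing i with
  | nil => simp [pvNest, pvOpens, pvCloses]
  | cons c r ih =>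
    rw [pvNest]
    simp only [if_pos hi]
    rw [ih (i + 1) (by omega)]
    simp [pvOpens, pvOpn, pvCloses, List.append_assoc]

-- B's recursion at depth 0
theorem pvNest_zero (n : Nat) (cs : List (List (String × String))) :
    pvNest n 0 cs = pvOpens 0 cs ++ pvPayload n ++ (if cs.length = 0 then [] else pvCloses 1 (cs.length - 1)) := by
  cases cs with
  | nil => simp [pvNest, pvOpens]
  | cons c r =>
    rw [pvNest]
    simp only [Nat.lt_irrefl, if_false]
    rw [pvNest_pos n r 1 (by omega)]
    simp [pvOpens, pvOpn, List.length_cons, List.append_assoc]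

-- ===== VERDICT (by name: the statement is the Claim_ definition above) =====
theorem generate_template_spec : Claim_equal_generate_template := by
  intro length conditions _
  unfold Spec_generate_template generate_template generate_template_alt
  dsimp only
  rw [show (PySem.List.enumerate conditions (0 : Int)) = PySem.List.enumerate conditions ((0 : Nat) : Int) by
    norm_num]
  rw [pvFoldOpen, pvFoldClose, pvNest_zero]
  rw [show ((conditions.length : Int) + 1) = ((conditions.length + 1 : Nat) : Int) by push_cast; ring,
    pvRepeat_natCast]
  refine congrArg String.ofList ?_
  simp [pvPayload, pvIndentB, List.append_assoc]
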